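-- pv_equiv track=rewrite | github.com/dhiraj-wasu/ZeroTrust-Defender-AI-Driven-Ransomware-Detection | client_agent_fastapi/detection/slow_ransomware_detector.py | _extract_file_sequences
-- ===== SOURCE A (Python) =====
-- from typing import Dict, List, Any, Tuple
--
-- def _extract_file_sequences(file_events: List[Dict]) -> List[List[str]]:
--     """Extract file access sequences"""
--     sequences = []
--     current_sequence = []
--
--     for event in file_events:
--         file_path = event.get("file_path", "")
--         if file_path:
--             current_sequence.append(file_path)
--         else:
--             if current_sequence:
--                 sequences.append(current_sequence)
--                 current_sequence = []
--
--     if current_sequence: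
--         sequences.append(current_sequence)
--
--     return sequences
-- ===== SOURCE B (Python) =====
-- from typing import Dict, List, Any, Tuple
--
-- def _extract_file_sequences(file_events: List[Dict]) -> List[List[str]]:
--     """Extract file access sequences (two-pointer block scan)."""
--     result = []
--     i, n = 0, len(file_events)
--     while i < n:
--         if not file_events[i].get("file_path", ""):
--             i += 1
--         else:
--             j = i + 1
--             while j < n and file_events[j].get("file_path", ""):
--                 j += 1
--             result.append([e.get("file_path", "") for e in file_events[i:j]])
--             i = j
--     return result
-- ===== Notes on version B (the rewrite author's own statement) =====
-- stated objective: alternative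
-- what changed: Replaces A's element-wise accumulator with post-loop flush by a two-pointer scan that finds each maximal truthy block at once (inner while / slice) and appends it whole, so no mutable current-sequence state or final flush exists.
import Mathlib
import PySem

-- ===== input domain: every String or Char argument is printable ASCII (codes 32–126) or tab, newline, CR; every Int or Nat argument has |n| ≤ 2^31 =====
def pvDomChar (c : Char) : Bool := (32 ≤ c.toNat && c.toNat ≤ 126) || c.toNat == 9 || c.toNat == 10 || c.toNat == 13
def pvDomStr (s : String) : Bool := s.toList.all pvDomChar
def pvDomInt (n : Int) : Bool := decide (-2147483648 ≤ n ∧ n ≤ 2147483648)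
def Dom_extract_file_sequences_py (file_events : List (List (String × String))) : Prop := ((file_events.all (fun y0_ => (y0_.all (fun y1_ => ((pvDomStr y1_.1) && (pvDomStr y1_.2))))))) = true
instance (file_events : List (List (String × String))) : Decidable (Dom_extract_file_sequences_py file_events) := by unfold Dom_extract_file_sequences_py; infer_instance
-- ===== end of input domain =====

-- B replaces A's element-wise accumulator-and-flush loop by a two-pointer scan that
-- takes each maximal nonempty-path block at once (objective: alternative; same cost).

-- event.get("file_path", "")
def pvPath (e : List (String × String)) : String :=
  PySem.Dict.getD ⟨e⟩ "file_path" ""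

-- ===== PORT A =====
-- one step of A's for-loop over (sequences, current_sequence)
def pvStepA (st : List (List String) × List String) (e : List (String × String)) :
    List (List String) × List String :=
  let file_path := pvPath e
  if file_path ≠ "" then (st.1, st.2 ++ [file_path])
  else if st.2 ≠ [] then (st.1 ++ [st.2], []) else st

def extract_file_sequences_py (file_events : List (List (String × String))) : List (List String) :=
  let st := file_events.foldl pvStepA ([], [])
  if st.2 ≠ [] then st.1 ++ [st.2] else st.1

-- ===== PORT B =====
-- outer while-loop of Source B: skip an empty-path event, or take the whole truthy block
-- (the inner 'while j < n and …' / slice is the takeWhile/dropWhile span of the rest)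
def pvGoB : List (List (String × String)) → List (List String)
  | [] => []
  | e :: rest =>
    if pvPath e = "" then pvGoB rest
    else (pvPath e :: (rest.takeWhile (fun x => pvPath x ≠ "")).map pvPath) ::
         pvGoB (rest.dropWhile (fun x => pvPath x ≠ ""))
termination_by l => l.length
decreasing_by
  · simp
  · exact Nat.lt_succ_of_le (List.length_dropWhile_le _ _)

def extract_file_sequences_py_alt (file_events : List (List (String × String))) : List (List String) :=
  pvGoB file_events

-- ===== PRECONDITION & SPEC =====
def Spec_extract_file_sequences_py (file_events : List (List (String × String))) (out : List (List String)) : Prop := out = extract_file_sequences_py_alt file_events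
instance (file_events : List (List (String × String))) (out : List (List String)) : Decidable (Spec_extract_file_sequences_py file_events out) := by unfold Spec_extract_file_sequences_py; infer_instance

-- ===== CLAIM (what is proved, stated in full; the proofs are below) =====
def Claim_equal_extract_file_sequences_py : Prop := ∀ (file_events : List (List (String × String))), Dom_extract_file_sequences_py file_events → Spec_extract_file_sequences_py file_events (extract_file_sequences_py file_events)

-- ===== LEMMAS AND PROOFS =====

-- A's flush of the final state
def pvFlush (st : List (List String) × List String) : List (List String) :=
  if st.2 ≠ [] then st.1 ++ [st.2] else st.1

-- the already-finished sequences prefix factors out of A's loop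
theorem pvShift (l : List (List (String × String))) :
    ∀ (seqs : List (List String)) (cur : List String),
      pvFlush (l.foldl pvStepA (seqs, cur)) = seqs ++ pvFlush (l.foldl pvStepA ([], cur)) := by
  induction l with
  | nil =>
    intro seqs cur
    simp [pvFlush]; split_ifs <;> simp
  | cons e rest ih =>
    intro seqs cur
    simp only [List.foldl_cons, pvStepA]
    split_ifs with h1 h2
    · exact ih seqs (cur ++ [pvPath e])
    · rw [ih (seqs ++ [cur]) [], ih ([] ++ [cur]) []]
      simp
    · exact ih seqs cur

-- what A's loop computes from state ([], cur), expressed with B's block structure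
theorem pvMain (l : List (List (String × String))) :
    ∀ (cur : List String),
      pvFlush (l.foldl pvStepA ([], cur)) =
        if cur = [] then pvGoB l
        else (cur ++ (l.takeWhile (fun x => pvPath x ≠ "")).map pvPath) ::
             pvGoB (l.dropWhile (fun x => pvPath x ≠ "")) := by
  induction l with
  | nil =>
    intro cur
    simp [pvFlush, pvGoB]
  | cons e rest ih =>
    intro cur
    by_cases hp : pvPath e = "" <;> by_cases hc : cur = []
    · subst hc
      have hstep : pvStepA ([], []) e = ([], []) := by simp [pvStepA, hp]
      rw [List.foldl_cons, hstep, ih []]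
      simp [pvGoB, hp]
    · have hstep : pvStepA ([], cur) e = ([cur], []) := by simp [pvStepA, hp, hc]
      rw [List.foldl_cons, hstep, pvShift rest [cur] [], ih []]
      simp [hc, hp, pvGoB]
    · subst hc
      have hstep : pvStepA ([], []) e = ([], [pvPath e]) := by simp [pvStepA, hp]
      rw [List.foldl_cons, hstep, ih [pvPath e]]
      simp [pvGoB, hp]
    · have hstep : pvStepA ([], cur) e = ([], cur ++ [pvPath e]) := by simp [pvStepA, hp]
      rw [List.foldl_cons, hstep, ih (cur ++ [pvPath e])]
      simp [hc, hp]

-- ===== VERDICT (by name: the statement is the Claim_ definition above) =====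
theorem extract_file_sequences_py_spec : Claim_equal_extract_file_sequences_py := by
  intro fe _
  unfold Spec_extract_file_sequences_py extract_file_sequences_py extract_file_sequences_py_alt
  have := pvMain fe []
  simp only [if_pos] at this
  exact this
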